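-- pv_equiv track=rewrite | github.com/algurumurthy/MIT_6.009_Lab_Materials | lab6.py | update_unit_clauses
-- ===== SOURCE A (Python) =====
-- def update_unit_clauses(CNF, assignment):
--     """
--     Helper function to better understand where to place unit clauses. Given a
--     CNF and a temporary assignment of sorts, it will loop through and check for
--     any sub cluases of len(1) returning an updated assignment as well
--     as the CNF that was inputted
--     """
--     for sub_clause in CNF:
--         if len(sub_clause) == 1:
--             assignment[sub_clause[0][0]] = sub_clause[0][1]
--             update = formula_update(CNF, sub_clause[0])
--             if update is None:
--                 return (None, None)
--             return update_unit_clauses(update, assignment)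
--     return CNF, assignment
--
-- def formula_update(CNF, value):
--     """
--     This updates any inputted CNF by a given value (tuple) that might be
--     inputted and returns the list (or in this case, updated CNF function)
--     """
--     new_CNF = []
--     if CNF == []:
--         return []
--     for sub_clause in CNF:
--         #if you have an empty list anywhere, then it immediately fails ot satisfy
--         if sub_clause == []:
--             return None
--         if value not in sub_clause:
--             im_list = []
--             for tup in sub_clause:
--                 if value[0] != tup[0]:
--                     im_list.append(tup)
--             new_CNF.append(im_list)
--     return new_CNF
-- ===== SOURCE B (Python) =====
-- def update_unit_clauses(CNF, assignment):
--     # One fused pass per propagation round: while reducing the CNF we also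
--     # detect empty clauses and remember the first newly-created unit clause,
--     # so each round scans the formula once instead of twice.
--     unit = None
--     for c in CNF:
--         if len(c) == 1:
--             unit = c[0]
--             break
--     while unit is not None:
--         assignment[unit[0]] = unit[1]
--         new = []
--         nxt = None
--         for c in CNF:
--             if c == []:
--                 return (None, None)
--             if unit not in c:
--                 rc = [t for t in c if unit[0] != t[0]]
--                 if nxt is None and len(rc) == 1:
--                     nxt = rc[0]
--                 new.append(rc)
--         CNF = new
--         unit = nxt
--     return CNF, assignment
-- ===== Notes on version B (the rewrite author's own statement) =====
-- stated objective: alternative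
-- what changed: A's recursion does two full scans per propagated unit (one to find the unit clause, one in formula_update to rebuild the CNF); B is a single while-loop whose one fused pass per round rebuilds the CNF, detects empty clauses and remembers the first newly-created unit clause, so the separate find-unit rescans disappear.
import Mathlib
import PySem

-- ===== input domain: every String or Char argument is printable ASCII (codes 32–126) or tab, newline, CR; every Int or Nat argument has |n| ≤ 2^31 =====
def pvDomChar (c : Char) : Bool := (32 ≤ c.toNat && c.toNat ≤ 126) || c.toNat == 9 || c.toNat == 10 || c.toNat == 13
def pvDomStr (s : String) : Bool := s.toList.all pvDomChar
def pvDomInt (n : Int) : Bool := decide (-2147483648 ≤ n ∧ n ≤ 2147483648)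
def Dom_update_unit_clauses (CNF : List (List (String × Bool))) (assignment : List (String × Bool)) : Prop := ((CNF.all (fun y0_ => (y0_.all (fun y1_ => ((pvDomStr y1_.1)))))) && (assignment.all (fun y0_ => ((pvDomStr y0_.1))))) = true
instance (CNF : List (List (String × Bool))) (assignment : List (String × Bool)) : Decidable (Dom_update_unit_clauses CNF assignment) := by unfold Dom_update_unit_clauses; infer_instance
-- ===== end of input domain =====

-- B fuses A's two scans per propagation round (find-unit scan + formula_update scan) into one
-- pass that filters, detects empty clauses and remembers the next unit; return-value equivalence
-- (both Pythons mutate the caller's `assignment` dict identically).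

-- ===== PORT A =====
-- Python dict assignment d[k] = v (overwrite in place, new keys append), on the assoc list.
def pvAssign (asg : List (String × Bool)) (k : String) (b : Bool) : List (String × Bool) :=
  ((PySem.Dict.mk asg).insert k b).items

-- the `for sub_clause in CNF: if len(sub_clause) == 1: … sub_clause[0]` scan of A
def pvFindUnit : List (List (String × Bool)) → Option (String × Bool)
  | [] => none
  | c :: rest => if c.length = 1 then c.head? else pvFindUnit rest

-- the loop of formula_update: empty clause → None, drop clauses containing value,
-- remove value's variable from the kept clauses (im_list built by the inner loop = filter)
def pvFuLoop (value : String × Bool) : List (List (String × Bool)) → List (List (String × Bool)) → Option (List (List (String × Bool)))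
  | [], acc => some acc
  | c :: rest, acc =>
    if c = [] then none
    else if value ∈ c then pvFuLoop value rest acc
    else pvFuLoop value rest (acc ++ [c.filter (fun t => value.1 != t.1)])

def formula_update (CNF : List (List (String × Bool))) (value : String × Bool) : Option (List (List (String × Bool))) :=
  if CNF = [] then some [] else pvFuLoop value CNF []

-- termination facts for A's recursion (cited by decreasing_by, hence placed above the port)
theorem pvFuLoop_length (value : String × Bool) (l acc r : List (List (String × Bool)))
    (h : pvFuLoop value l acc = some r) (hc : ∃ c ∈ l, value ∈ c) :
    r.length < acc.length + l.length := by
  induction l generalizing acc with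
  | nil => exact absurd hc (by simp)
  | cons c rest ih =>
    have hle : ∀ (acc' r' : List (List (String × Bool))), pvFuLoop value rest acc' = some r' → r'.length ≤ acc'.length + rest.length := by
      clear h hc ih
      induction rest with
      | nil => intro acc' r' h; simp [pvFuLoop] at h; simp [h]
      | cons d rest2 ih2 =>
        intro acc' r' h
        simp only [pvFuLoop] at h
        split at h
        · exact absurd h (by simp)
        · split at h
          · have := ih2 _ _ h; simpa using by omega
          · have := ih2 _ _ h; simp at this ⊢; omega
    simp only [pvFuLoop] at h
    split at h
    · exact absurd h (by simp)
    · split at h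
      · have := hle _ _ h; simp; omega
      · rename_i hne hnm
        rcases hc with ⟨c', hc', hv⟩
        rcases List.mem_cons.mp hc' with rfl | hc'
        · exact absurd hv hnm
        · have := ih _ h ⟨c', hc', hv⟩
          simp at this ⊢; omega

theorem pvFindUnit_mem (l : List (List (String × Bool))) (v : String × Bool)
    (h : pvFindUnit l = some v) : ∃ c ∈ l, v ∈ c := by
  induction l with
  | nil => simp [pvFindUnit] at h
  | cons c rest ih =>
    simp only [pvFindUnit] at h
    split at h
    · exact ⟨c, by simp, by rcases c with _ | ⟨t, ts⟩ <;> simp_all⟩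
    · rcases ih h with ⟨c', h1, h2⟩; exact ⟨c', by simp [h1], h2⟩

theorem formula_update_length (CNF upd : List (List (String × Bool))) (v : String × Bool)
    (hu : pvFindUnit CNF = some v) (h : formula_update CNF v = some upd) :
    upd.length < CNF.length := by
  unfold formula_update at h
  split at h
  · subst ‹CNF = []›; simp [pvFindUnit] at hu
  · have := pvFuLoop_length v CNF [] upd h (pvFindUnit_mem CNF v hu)
    simpa using this

def update_unit_clauses (CNF : List (List (String × Bool))) (assignment : List (String × Bool)) : (Option (List (List (String × Bool)))) × (Option (List (String × Bool))) :=
  match hu : pvFindUnit CNF with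
  | none => (some CNF, some assignment)
  | some v =>
    let assignment' := pvAssign assignment v.1 v.2
    match hf : formula_update CNF v with
    | none => (none, none)
    | some upd => update_unit_clauses upd assignment'
termination_by CNF.length
decreasing_by exact formula_update_length CNF upd v hu hf

-- ===== PORT B =====
-- initial `for c in CNF: if len(c) == 1: unit = c[0]; break`
def pvFirstUnit : List (List (String × Bool)) → Option (String × Bool)
  | [] => none
  | [t] :: _ => some t
  | _ :: rest => pvFirstUnit rest

-- one fused round of Source B's while-body: returns none on an empty clause (-> (None,None)),
-- otherwise the reduced CNF together with the first unit clause created, in order.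
def pvBuildRound (v : String × Bool) : List (List (String × Bool)) → List (List (String × Bool)) → Option (String × Bool) → Option (List (List (String × Bool)) × Option (String × Bool))
  | [], acc, nxt => some (acc, nxt)
  | c :: rest, acc, nxt =>
    if c = [] then none
    else if v ∈ c then pvBuildRound v rest acc nxt
    else
      let rc := c.filter (fun t => v.1 != t.1)
      let nxt' := if nxt = none ∧ rc.length = 1 then rc.head? else nxt
      pvBuildRound v rest (acc ++ [rc]) nxt'

-- Source B's while-loop; fuel (a totality guard only) bounds the rounds: each round strictly
-- shrinks the CNF, so fuel = |CNF| + 1 at the call site is never exhausted (proved below).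
def pvAltLoop : Nat → Option (String × Bool) → List (List (String × Bool)) → List (String × Bool) → (Option (List (List (String × Bool)))) × (Option (List (String × Bool)))
  | 0, _, _, _ => (none, none)
  | _ + 1, none, CNF, assignment => (some CNF, some assignment)
  | fuel + 1, some v, CNF, assignment =>
    let assignment' := pvAssign assignment v.1 v.2
    match pvBuildRound v CNF [] none with
    | none => (none, none)
    | some (new, nxt) => pvAltLoop fuel nxt new assignment'

def update_unit_clauses_alt (CNF : List (List (String × Bool))) (assignment : List (String × Bool)) : (Option (List (List (String × Bool)))) × (Option (List (String × Bool))) :=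
  pvAltLoop (CNF.length + 1) (pvFirstUnit CNF) CNF assignment

-- ===== PRECONDITION & SPEC =====
def Spec_update_unit_clauses (CNF : List (List (String × Bool))) (assignment : List (String × Bool)) (out : (Option (List (List (String × Bool)))) × (Option (List (String × Bool)))) : Prop := out = update_unit_clauses_alt CNF assignment
instance (CNF : List (List (String × Bool))) (assignment : List (String × Bool)) (out : (Option (List (List (String × Bool)))) × (Option (List (String × Bool)))) : Decidable (Spec_update_unit_clauses CNF assignment out) := by unfold Spec_update_unit_clauses; infer_instance

-- ===== CLAIM (what is proved, stated in full; the proofs are below) =====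
def Claim_equal_update_unit_clauses : Prop := ∀ (CNF : List (List (String × Bool))) (assignment : List (String × Bool)), Dom_update_unit_clauses CNF assignment → Spec_update_unit_clauses CNF assignment (update_unit_clauses CNF assignment)

-- ===== LEMMAS AND PROOFS =====

theorem pvFirstUnit_eq_pvFindUnit (l : List (List (String × Bool))) : pvFirstUnit l = pvFindUnit l := by
  induction l with
  | nil => rfl
  | cons c rest ih =>
    rcases c with _ | ⟨t, _ | _⟩ <;> simp [pvFirstUnit, pvFindUnit, ih]

theorem pvFindUnit_append (a b : List (List (String × Bool))) :
    pvFindUnit (a ++ b) = (pvFindUnit a).or (pvFindUnit b) := by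
  induction a with
  | nil => simp [pvFindUnit]
  | cons c rest ih =>
    simp only [List.cons_append, pvFindUnit, ih]
    split
    · rename_i hc
      rcases c with _ | ⟨t, _ | _⟩ <;> simp_all
    · rfl

-- the fused round computes formula_update's result paired with the first unit of that result
theorem pvBuildRound_eq (v : String × Bool) (l acc : List (List (String × Bool))) (nxt : Option (String × Bool))
    (hinv : nxt = pvFindUnit acc) :
    pvBuildRound v l acc nxt = (pvFuLoop v l acc).map (fun r => (r, pvFindUnit r)) := by
  induction l generalizing acc nxt with
  | nil => simp [pvBuildRound, pvFuLoop, hinv]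
  | cons c rest ih =>
    simp only [pvBuildRound, pvFuLoop]
    split
    · simp
    · split
      · exact ih acc nxt hinv
      · apply ih
        have happ : pvFindUnit (acc ++ [c.filter (fun t => v.1 != t.1)]) =
            (pvFindUnit acc).or (pvFindUnit [c.filter (fun t => v.1 != t.1)]) := pvFindUnit_append _ _
        subst hinv
        rcases hpa : pvFindUnit acc with _ | u
        · simp only [happ, hpa, Option.none_or]
          by_cases hl : (c.filter (fun t => v.1 != t.1)).length = 1
          · simp [pvFindUnit, hl]
          · simp [pvFindUnit, hl]
        · simp [happ, hpa]

-- fuel never runs out and the two loops agree, by strong induction on the CNF length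
theorem pvMain : ∀ n CNF assignment, CNF.length ≤ n → ∀ fuel, CNF.length < fuel →
    pvAltLoop fuel (pvFindUnit CNF) CNF assignment = update_unit_clauses CNF assignment := by
  intro n
  induction n with
  | zero =>
    intro CNF assignment hlen fuel hfuel
    have : CNF = [] := List.length_eq_zero_iff.mp (Nat.le_zero.mp hlen)
    subst this
    rcases fuel with _ | f
    · omega
    · simp [pvAltLoop, pvFindUnit, update_unit_clauses]
  | succ n ih =>
    intro CNF assignment hlen fuel hfuel
    rcases fuel with _ | f
    · omega
    rw [update_unit_clauses]
    split
    · rename_i hu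
      rw [hu]; simp [pvAltLoop]
    · rename_i v hu
      rw [hu]
      have hCNF : CNF ≠ [] := by rintro rfl; simp [pvFindUnit] at hu
      have hfu : formula_update CNF v = pvFuLoop v CNF [] := by
        unfold formula_update; simp [hCNF]
      split
      · rename_i hf
        simp only [pvAltLoop]
        rw [pvBuildRound_eq v CNF [] none rfl, ← hfu, hf]
        simp
      · rename_i upd hf
        have hlt : upd.length < CNF.length := formula_update_length CNF upd v hu hf
        simp only [pvAltLoop]
        rw [pvBuildRound_eq v CNF [] none rfl, ← hfu, hf]
        simp only [Option.map_some]
        exact ih upd (pvAssign assignment v.1 v.2) (by omega) f (by omega)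

-- ===== VERDICT (by name: the statement is the Claim_ definition above) =====
theorem update_unit_clauses_spec : Claim_equal_update_unit_clauses := by
  intro CNF assignment _
  unfold Spec_update_unit_clauses update_unit_clauses_alt
  rw [pvFirstUnit_eq_pvFindUnit,
      pvMain CNF.length CNF assignment le_rfl (CNF.length + 1) (by omega)]
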